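-- pv_equiv track=rewrite | github.com/Dmitry273/adventofcode | Day5/Day5-2Sol.py | SrcToDest
-- ===== SOURCE A (Python) =====
-- def IntInRange(num: int, section: list[int]) -> bool:
--     return section[0] <= num and num < section[1]
--
-- def SrcToDest(maps, sections):
--     breakpoints = []
--     for mapp in maps:
--         for section in sections:
--             if IntInRange(mapp[1][0], section):
--                 breakpoints.append(mapp[1][0])
--             if IntInRange(mapp[1][1], section):
--                 breakpoints.append(mapp[1][1])
--
--     for point in breakpoints:
--         insert_point = [j for j, section in enumerate(sections) if IntInRange(point, section)][0]
--         old = sections[insert_point]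
--         sections.insert(insert_point, [old[0], point])
--         sections[insert_point+1] = [point, old[1]]
--
--     for j, section in enumerate(sections):
--         shift = 0
--         for mapp in maps:
--             if IntInRange(section[0], mapp[1]):
--                 shift = mapp[0]
--                 break
--         sections[j] = [section[0]+shift, section[1]+shift]
--
--     return sections
-- ===== SOURCE B (Python) =====
-- def SrcToDest(maps, sections):
--     result = []
--     for s in sections:
--         cuts = sorted(e for d, r in maps for e in (r[0], r[1]) if s[0] <= e < s[1])
--         bounds = [s[0]] + cuts + [s[1]]
--         for a, b in zip(bounds, bounds[1:]):
--             shift = next((d for d, r in maps if r[0] <= a < r[1]), 0)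
--             result.append([a + shift, b + shift])
--     sections[:] = result
--     return sections
-- ===== Notes on version B (the rewrite author's own statement) =====
-- stated objective: alternative
-- what changed: Instead of collecting all breakpoints and repeatedly splicing split pieces into the evolving section list (rescanning the list for each breakpoint), B handles each section independently: it gathers and sorts the map endpoints falling in that section and emits the shifted pieces in one pass; Pre_ additionally excludes inputs where some map endpoint lies in two or more (overlapping) sections, on which A's assignment of split points to sections (all occurrences pile onto the first containing section, producing degenerate [p,p] pieces) is an accident of its repeated-splice implementation.
import Mathlib
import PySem

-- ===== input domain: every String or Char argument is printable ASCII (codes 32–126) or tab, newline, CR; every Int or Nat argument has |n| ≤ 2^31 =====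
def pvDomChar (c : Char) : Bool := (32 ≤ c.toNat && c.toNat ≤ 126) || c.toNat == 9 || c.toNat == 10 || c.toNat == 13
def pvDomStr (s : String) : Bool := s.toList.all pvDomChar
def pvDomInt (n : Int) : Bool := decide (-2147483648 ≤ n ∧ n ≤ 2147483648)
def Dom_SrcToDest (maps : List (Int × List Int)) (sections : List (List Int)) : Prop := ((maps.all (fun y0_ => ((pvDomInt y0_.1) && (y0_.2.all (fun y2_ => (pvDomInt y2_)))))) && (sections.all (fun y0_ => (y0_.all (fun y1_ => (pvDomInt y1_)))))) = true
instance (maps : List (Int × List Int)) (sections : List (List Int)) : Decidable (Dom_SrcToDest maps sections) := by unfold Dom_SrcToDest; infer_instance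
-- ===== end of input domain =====

-- B replaces A's global breakpoint collection and repeated splice-into-the-evolving-list
-- splitting by one independent pass per section (sort that section's in-range map
-- endpoints, cut, shift); A also mutates `sections` in place — the equivalence proved
-- here is about the RETURN value (B rebinds the list to the same value).

-- ===== PORT A =====
def IntInRange (num : Int) (s : List Int) : Bool :=
  decide (s.getD 0 0 ≤ num) && decide (num < s.getD 1 0)

def pvBreakpoints (maps : List (Int × List Int)) (sections : List (List Int)) : List Int :=
  maps.foldl (fun bps mapp =>
    sections.foldl (fun bps s =>
      let bps := if IntInRange (mapp.2.getD 0 0) s then bps ++ [mapp.2.getD 0 0] else bps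
      if IntInRange (mapp.2.getD 1 0) s then bps ++ [mapp.2.getD 1 0] else bps) bps) []

def pvSplit (secs : List (List Int)) (point : Int) : List (List Int) :=
  let ip := (secs.findIdx? (fun s => IntInRange point s)).getD 0
  let old := secs.getD ip []
  (PySem.List.insert secs (ip : Int) [old.getD 0 0, point]).set (ip + 1) [point, old.getD 1 0]

def pvShift (maps : List (Int × List Int)) (s : List Int) : List Int :=
  let shift := ((maps.find? (fun mapp => IntInRange (s.getD 0 0) mapp.2)).map Prod.fst).getD 0
  [s.getD 0 0 + shift, s.getD 1 0 + shift]

def SrcToDest (maps : List (Int × List Int)) (sections : List (List Int)) : List (List Int) :=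
  ((pvBreakpoints maps sections).foldl pvSplit sections).map (pvShift maps)

-- ===== PORT B =====
def pvPieces (maps : List (Int × List Int)) (s : List Int) (cuts : List Int) : List (List Int) :=
  let bounds := s.getD 0 0 :: (PySem.List.sorted cuts (fun x => x) ++ [s.getD 1 0])
  (bounds.zip bounds.tail).map (fun ab =>
    let shift := ((maps.find? (fun mapp =>
        decide (mapp.2.getD 0 0 ≤ ab.1) && decide (ab.1 < mapp.2.getD 1 0))).map Prod.fst).getD 0
    [ab.1 + shift, ab.2 + shift])

def SrcToDest_alt (maps : List (Int × List Int)) (sections : List (List Int)) : List (List Int) :=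
  sections.flatMap (fun s =>
    pvPieces maps s (maps.flatMap (fun m =>
      ([m.2.getD 0 0, m.2.getD 1 0]).filter (fun e =>
        decide (s.getD 0 0 ≤ e) && decide (e < s.getD 1 0)))))

-- ===== PRECONDITION & SPEC =====
-- Pre_ excludes (a) inputs on which A raises IndexError (some section, or — when
-- sections is nonempty — some map range, shorter than 2 entries), and (b) inputs where
-- some map endpoint lies in two or more (overlapping) sections, on which A's piling of
-- all split occurrences onto the first containing section (producing degenerate [p,p]
-- pieces) is an accident of its repeated-splice implementation.
def Pre_SrcToDest (maps : List (Int × List Int)) (sections : List (List Int)) : Prop :=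
  (∀ s ∈ sections, 2 ≤ s.length) ∧ (sections ≠ [] → ∀ m ∈ maps, 2 ≤ m.2.length) ∧
  (∀ m ∈ maps, ∀ e ∈ [m.2.getD 0 0, m.2.getD 1 0],
    sections.countP (fun s => decide (s.getD 0 0 ≤ e ∧ e < s.getD 1 0)) ≤ 1)
instance (maps : List (Int × List Int)) (sections : List (List Int)) : Decidable (Pre_SrcToDest maps sections) := by unfold Pre_SrcToDest; infer_instance

def pvWitness_SrcToDest : (List (Int × List Int)) × List (List Int) :=
  ([(10, [2, 5]), (-1, [4, 9])], [[0, 8], [8, 12]])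

def Spec_SrcToDest (maps : List (Int × List Int)) (sections : List (List Int)) (out : List (List Int)) : Prop := out = SrcToDest_alt maps sections
instance (maps : List (Int × List Int)) (sections : List (List Int)) (out : List (List Int)) : Decidable (Spec_SrcToDest maps sections out) := by unfold Spec_SrcToDest; infer_instance

-- ===== CLAIM (what is proved, stated in full; the proofs are below) =====
def Claim_equal_SrcToDest : Prop := ∀ (maps : List (Int × List Int)) (sections : List (List Int)), Dom_SrcToDest maps sections → Pre_SrcToDest maps sections → Spec_SrcToDest maps sections (SrcToDest maps sections)

-- ===== LEMMAS AND PROOFS =====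
def chain (a b : Int) : List Int → List (List Int)
  | [] => [[a, b]]
  | p :: ps => [a, p] :: chain p b ps

def trf (l : List (List Int)) (j : Nat) (p : Int) : List (List Int) :=
  let old := l.getD j []
  (PySem.List.insert l (j : Int) [old.getD 0 0, p]).set (j + 1) [p, old.getD 1 0]

theorem trf_concrete (l : List (List Int)) (j : Nat) (p : Int) (h : j < l.length) :
    trf l j p = l.take j ++ [[(l.getD j []).getD 0 0, p], [p, (l.getD j []).getD 1 0]] ++ l.drop (j + 1) := by
  show (PySem.List.insert l (j : Int) [(l.getD j []).getD 0 0, p]).set (j + 1) [p, (l.getD j []).getD 1 0] = _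
  rw [PySem.List.insert_natCast l j _ (le_of_lt h)]
  rw [List.drop_eq_getElem_cons h]
  rw [List.set_append]
  simp only [List.length_take, Nat.min_eq_left (le_of_lt h)]
  rw [if_neg (by omega)]
  have : j + 1 - j = 1 := by omega
  rw [this]
  simp only [List.set_cons_succ]
  rw [List.set_cons_zero]
  simp

def chain0 (s : List Int) : List Int → List (List Int)
  | [] => [s]
  | p :: ps => [s.getD 0 0, p] :: chain p (s.getD 1 0) ps

def insL (p : Int) (ps : List Int) : List Int :=
  ps.takeWhile (fun q => decide (q ≤ p)) ++ p :: ps.dropWhile (fun q => decide (q ≤ p))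

theorem chain_length (a b : Int) (ps : List Int) : (chain a b ps).length = ps.length + 1 := by
  induction ps generalizing a with
  | nil => simp [chain]
  | cons q ps ih => simp [chain, ih]

theorem chain0_eq_chain (s : List Int) (ps : List Int) (h : ps ≠ []) :
    chain0 s ps = chain (s.getD 0 0) (s.getD 1 0) ps := by
  cases ps with
  | nil => exact absurd rfl h
  | cons q ps => simp [chain0, chain]

theorem chain0_length (s : List Int) (ps : List Int) : (chain0 s ps).length = ps.length + 1 := by
  cases ps with
  | nil => simp [chain0]
  | cons q ps => simp [chain0, chain_length]

theorem findIdx_chain_none (p s0 b : Int) (hp : ¬ (s0 ≤ p ∧ p < b)) :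
    ∀ (ps : List Int) (a : Int), s0 ≤ a → (∀ q ∈ ps, s0 ≤ q ∧ q < b) →
      List.findIdx? (fun s => IntInRange p s) (chain a b ps) = none := by
  intro ps
  induction ps with
  | nil =>
    intro a ha _
    simp only [chain, List.findIdx?_cons, List.findIdx?_nil]
    rw [if_neg (by simp [IntInRange]; intro h1; omega)]
    simp
  | cons q ps ih =>
    intro a ha hb
    simp only [chain, List.findIdx?_cons]
    rw [if_neg (by
      simp [IntInRange]
      intro h1
      have hq := hb q (by simp)
      omega)]
    rw [ih q (hb q (by simp)).1 (fun r hr => hb r (by simp [hr]))]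
    simp

theorem trf_cons (x : List Int) (l : List (List Int)) (j : Nat) (p : Int) (h : j < l.length) :
    trf (x :: l) (j + 1) p = x :: trf l j p := by
  rw [trf_concrete _ _ _ (by simp; omega), trf_concrete _ _ _ h]
  simp

theorem chain_split (p b : Int) :
    ∀ (ps : List Int) (a : Int), a ≤ p → p < b → ps.Pairwise (· ≤ ·) →
      (∀ q ∈ ps, a ≤ q ∧ q < b) →
      List.findIdx? (fun s => IntInRange p s) (chain a b ps)
          = some (ps.takeWhile (fun q => decide (q ≤ p))).length
        ∧ trf (chain a b ps) (ps.takeWhile (fun q => decide (q ≤ p))).length p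
          = chain a b (insL p ps) := by
  intro ps
  induction ps with
  | nil =>
    intro a hap hpb _ _
    constructor
    · simp only [chain, List.findIdx?_cons]
      rw [if_pos (by simp [IntInRange]; omega)]
      simp
    · rw [trf_concrete _ _ _ (by simp [chain])]
      simp [chain, insL]
  | cons q ps ih =>
    intro a hap hpb hsort hb
    by_cases hpq : p < q
    · have htw : (q :: ps).takeWhile (fun r => decide (r ≤ p)) = [] := by
        simp [List.takeWhile_cons]; omega
      have hdw : (q :: ps).dropWhile (fun r => decide (r ≤ p)) = q :: ps := by
        simp [List.dropWhile_cons]; omega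
      rw [htw]
      constructor
      · simp only [chain, List.findIdx?_cons]
        rw [if_pos (by simp [IntInRange]; omega)]
        simp
      · rw [trf_concrete _ _ _ (by simp [chain, chain_length])]
        simp only [List.length_nil]
        simp [chain, insL, htw, hdw]
    · have hqp : q ≤ p := by omega
      have htw : (q :: ps).takeWhile (fun r => decide (r ≤ p))
          = q :: ps.takeWhile (fun r => decide (r ≤ p)) := by
        simp [hqp]
      have hdw : (q :: ps).dropWhile (fun r => decide (r ≤ p))
          = ps.dropWhile (fun r => decide (r ≤ p)) := by
        simp [hqp]
      have hbnd : ∀ r ∈ ps, q ≤ r ∧ r < b := fun r hr =>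
        ⟨(List.pairwise_cons.mp hsort).1 r hr, (hb r (by simp [hr])).2⟩
      obtain ⟨ih1, ih2⟩ := ih q hqp hpb (List.pairwise_cons.mp hsort).2 hbnd
      rw [htw]
      constructor
      · simp only [chain, List.findIdx?_cons]
        rw [if_neg (by simp [IntInRange]; omega)]
        rw [ih1]
        simp
      · have hlt : (ps.takeWhile (fun r => decide (r ≤ p))).length < (chain q b ps).length := by
          rw [chain_length]
          have : (ps.takeWhile (fun r => decide (r ≤ p))).length ≤ ps.length :=
            (List.takeWhile_sublist _).length_le
          omega
        show trf ([a, q] :: chain q b ps) (ps.takeWhile (fun r => decide (r ≤ p))).length.succ p = _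
        rw [trf_cons _ _ _ _ hlt, ih2]
        simp [insL, chain, htw, hdw]

theorem findIdx_chain0_none (p : Int) (s : List Int) (ps : List Int)
    (hp : ¬ (s.getD 0 0 ≤ p ∧ p < s.getD 1 0))
    (hb : ∀ q ∈ ps, s.getD 0 0 ≤ q ∧ q < s.getD 1 0) :
    List.findIdx? (fun t => IntInRange p t) (chain0 s ps) = none := by
  cases ps with
  | nil =>
    simp only [chain0, List.findIdx?_cons, List.findIdx?_nil]
    rw [if_neg (by simp [IntInRange, List.getD_eq_getElem?_getD] at hp ⊢; omega)]
    simp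
  | cons q ps =>
    rw [chain0_eq_chain _ _ (by simp)]
    exact findIdx_chain_none p _ _ hp (q :: ps) _ le_rfl hb

theorem chain0_split (p : Int) (s : List Int) (ps : List Int)
    (h0 : s.getD 0 0 ≤ p) (h1 : p < s.getD 1 0) (hs : ps.Pairwise (· ≤ ·))
    (hb : ∀ q ∈ ps, s.getD 0 0 ≤ q ∧ q < s.getD 1 0) :
    List.findIdx? (fun t => IntInRange p t) (chain0 s ps)
        = some (ps.takeWhile (fun q => decide (q ≤ p))).length
      ∧ trf (chain0 s ps) (ps.takeWhile (fun q => decide (q ≤ p))).length p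
        = chain0 s (insL p ps) := by
  cases ps with
  | nil =>
    constructor
    · simp only [chain0, List.findIdx?_cons]
      rw [if_pos (by simp [IntInRange, List.getD_eq_getElem?_getD] at h0 h1 ⊢; omega)]
      simp
    · rw [trf_concrete _ _ _ (by simp [chain0])]
      simp [chain0, insL, chain]
  | cons q ps =>
    rw [chain0_eq_chain _ _ (by simp)]
    rw [chain0_eq_chain _ _ (by simp [insL])]
    exact chain_split p _ (q :: ps) _ h0 h1 hs hb

theorem insL_perm (p : Int) (ps : List Int) : (insL p ps).Perm (p :: ps) := by
  unfold insL
  have h := List.perm_middle (a := p) (l₁ := ps.takeWhile (fun q => decide (q ≤ p)))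
    (l₂ := ps.dropWhile (fun q => decide (q ≤ p)))
  rw [List.takeWhile_append_dropWhile] at h
  exact h

theorem mem_dropWhile_gt (p : Int) (ps : List Int) (hs : ps.Pairwise (· ≤ ·)) :
    ∀ x ∈ ps.dropWhile (fun q => decide (q ≤ p)), p < x := by
  induction ps with
  | nil => simp
  | cons q ps ih =>
    intro x hx
    rw [List.dropWhile_cons] at hx
    by_cases hq : q ≤ p
    · exact ih (List.pairwise_cons.mp hs).2 x (by simpa [hq] using hx)
    · simp only [decide_eq_true_eq, hq, if_false] at hx
      rcases List.mem_cons.mp (by simpa using hx) with h | h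
      · omega
      · have := (List.pairwise_cons.mp hs).1 x h
        omega

theorem insL_pairwise (p : Int) (ps : List Int) (h : ps.Pairwise (· ≤ ·)) :
    (insL p ps).Pairwise (· ≤ ·) := by
  unfold insL
  rw [List.pairwise_append]
  refine ⟨List.Pairwise.sublist (List.takeWhile_sublist _) h, ?_, ?_⟩
  · rw [List.pairwise_cons]
    refine ⟨fun x hx => le_of_lt (mem_dropWhile_gt p ps h x hx), List.Pairwise.sublist (List.dropWhile_sublist _) h⟩
  · intro x hx y hy
    have hxp : x ≤ p := by simpa using List.mem_takeWhile_imp hx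
    rcases List.mem_cons.mp hy with h' | h'
    · omega
    · have := mem_dropWhile_gt p ps h y h'
      omega

def flatG (gs : List (List Int × List Int)) : List (List Int) :=
  gs.flatMap (fun g => chain0 g.1 g.2)

def assignP (p : Int) : List (List Int × List Int) → List (List Int × List Int)
  | [] => []
  | g :: gs => if IntInRange p g.1 then (g.1, insL p g.2) :: gs else g :: assignP p gs

def InvG (gs : List (List Int × List Int)) : Prop :=
  ∀ g ∈ gs, g.2.Pairwise (· ≤ ·) ∧ ∀ q ∈ g.2, g.1.getD 0 0 ≤ q ∧ q < g.1.getD 1 0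

theorem contains_iff (p : Int) (s : List Int) :
    IntInRange p s = true ↔ (s.getD 0 0 ≤ p ∧ p < s.getD 1 0) := by
  simp [IntInRange, List.getD_eq_getElem?_getD]

theorem trf_append_left (l r : List (List Int)) (j : Nat) (p : Int) (h : j < l.length) :
    trf (l ++ r) j p = trf l j p ++ r := by
  rw [trf_concrete _ _ _ (by simp; omega), trf_concrete _ _ _ h]
  rw [List.getD_eq_getElem?_getD, List.getD_eq_getElem?_getD, List.getElem?_append_left h]
  rw [List.take_append_of_le_length (le_of_lt h), List.drop_append_of_le_length (by omega)]
  simp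

theorem trf_append_right (l r : List (List Int)) (j : Nat) (p : Int) (h : j < r.length) :
    trf (l ++ r) (l.length + j) p = l ++ trf r j p := by
  rw [trf_concrete _ _ _ (by simp; omega), trf_concrete _ _ _ h]
  rw [List.getD_eq_getElem?_getD, List.getD_eq_getElem?_getD, List.getElem?_append_right (by omega)]
  have h1 : l.length + j + 1 = l.length + (j + 1) := by omega
  rw [h1, List.take_append, List.drop_append]
  rw [List.take_of_length_le (by omega), List.drop_eq_nil_of_le (by omega)]
  simp

theorem split_flat (p : Int) :
    ∀ gs, InvG gs → (∃ g ∈ gs, IntInRange p g.1 = true) →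
      ∃ j, List.findIdx? (fun s => IntInRange p s) (flatG gs) = some j ∧
        j < (flatG gs).length ∧ trf (flatG gs) j p = flatG (assignP p gs) := by
  intro gs
  induction gs with
  | nil => rintro _ ⟨g, hg, _⟩; simp at hg
  | cons g gs ih =>
    intro hInv hex
    have hg := hInv g (List.mem_cons_self)
    have hflat : flatG (g :: gs) = chain0 g.1 g.2 ++ flatG gs := by simp [flatG]
    by_cases hc : IntInRange p g.1
    · have hcc := (contains_iff p g.1).mp hc
      obtain ⟨hf, ht⟩ := chain0_split p g.1 g.2 hcc.1 hcc.2 hg.1 hg.2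
      have hjlt : (g.2.takeWhile (fun q => decide (q ≤ p))).length < (chain0 g.1 g.2).length := by
        rw [chain0_length]
        have : (g.2.takeWhile (fun q => decide (q ≤ p))).length ≤ g.2.length :=
          (List.takeWhile_sublist _).length_le
        omega
      refine ⟨(g.2.takeWhile (fun q => decide (q ≤ p))).length, ?_, ?_, ?_⟩
      · rw [hflat, List.findIdx?_append, hf]; rfl
      · rw [hflat, List.length_append]; omega
      · rw [hflat, trf_append_left _ _ _ _ hjlt, ht]
        simp [assignP, hc, flatG]
    · have hex' : ∃ g' ∈ gs, IntInRange p g'.1 = true := by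
        rcases hex with ⟨g', hg', hq⟩
        rcases List.mem_cons.mp hg' with h | h
        · subst h; exact absurd hq hc
        · exact ⟨g', h, hq⟩
      obtain ⟨j, hf, hlt, ht⟩ := ih (fun g' h' => hInv g' (by simp [h'])) hex'
      have hnone := findIdx_chain0_none p g.1 g.2 (by
        intro h'; exact hc ((contains_iff p g.1).mpr h')) hg.2
      refine ⟨j + (chain0 g.1 g.2).length, ?_, ?_, ?_⟩
      · rw [hflat, List.findIdx?_append, hnone, hf]; rfl
      · rw [hflat, List.length_append]; omega
      · rw [hflat, add_comm, trf_append_right _ _ _ _ hlt, ht]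
        simp [assignP, hc, flatG]

theorem assignP_fst (p : Int) (gs : List (List Int × List Int)) :
    (assignP p gs).map Prod.fst = gs.map Prod.fst := by
  induction gs with
  | nil => rfl
  | cons g gs ih =>
    by_cases hc : IntInRange p g.1 <;> simp [assignP, hc, ih]

theorem assignP_inv (p : Int) (gs : List (List Int × List Int)) (h : InvG gs) :
    InvG (assignP p gs) := by
  induction gs with
  | nil => exact h
  | cons g gs ih =>
    by_cases hc : IntInRange p g.1
    · simp only [assignP, hc, if_pos]
      intro g' hg'
      rcases List.mem_cons.mp hg' with h' | h'
      · subst h'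
        have hg := h g (List.mem_cons_self)
        have hcc := (contains_iff p g.1).mp hc
        refine ⟨insL_pairwise p g.2 hg.1, ?_⟩
        intro q hq
        have : q ∈ p :: g.2 := (insL_perm p g.2).mem_iff.mp hq
        rcases List.mem_cons.mp this with h'' | h''
        · subst h''; exact hcc
        · exact hg.2 q h''
      · exact h g' (by simp [h'])
    · simp only [assignP, hc, Bool.false_eq_true, if_neg, not_false_iff]
      intro g' hg'
      rcases List.mem_cons.mp hg' with h' | h'
      · subst h'; exact h g' (List.mem_cons_self)
      · exact ih (fun g'' h'' => h g'' (by simp [h''])) g' h'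

theorem ex_contains_congr (q : Int) (l₁ l₂ : List (List Int × List Int))
    (h : l₁.map Prod.fst = l₂.map Prod.fst) :
    (∃ g ∈ l₁, IntInRange q g.1 = true) ↔ (∃ g ∈ l₂, IntInRange q g.1 = true) := by
  constructor
  · rintro ⟨g, hg, hq⟩
    have : g.1 ∈ l₂.map Prod.fst := h ▸ List.mem_map_of_mem hg
    rcases List.mem_map.mp this with ⟨g', hg', he⟩
    exact ⟨g', hg', he ▸ hq⟩
  · rintro ⟨g, hg, hq⟩
    have : g.1 ∈ l₁.map Prod.fst := h.symm ▸ List.mem_map_of_mem hg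
    rcases List.mem_map.mp this with ⟨g', hg', he⟩
    exact ⟨g', hg', he ▸ hq⟩

theorem pvSplit_eq_trf (l : List (List Int)) (p : Int) :
    pvSplit l p = trf l ((l.findIdx? (fun s => IntInRange p s)).getD 0) p := rfl

theorem foldl_split :
    ∀ (bps : List Int) gs, InvG gs → (∀ p ∈ bps, ∃ g ∈ gs, IntInRange p g.1 = true) →
      bps.foldl pvSplit (flatG gs) = flatG (bps.foldl (fun gs p => assignP p gs) gs) := by
  intro bps
  induction bps with
  | nil => intro gs _ _; rfl
  | cons p bps ih =>
    intro gs hInv hex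
    obtain ⟨j, hf, _, ht⟩ := split_flat p gs hInv (hex p (by simp))
    have hstep : pvSplit (flatG gs) p = flatG (assignP p gs) := by
      rw [pvSplit_eq_trf, hf]
      exact ht
    simp only [List.foldl_cons, hstep]
    exact ih (assignP p gs) (assignP_inv p gs hInv) (fun q hq =>
      (ex_contains_congr q (assignP p gs) gs (assignP_fst p gs)).mpr (hex q (by simp [hq])))

theorem foldl_assign_cons :
    ∀ (bps : List Int) (g : List Int × List Int) gs,
      bps.foldl (fun gs p => assignP p gs) (g :: gs)
        = (g.1, (bps.filter (fun p => IntInRange p g.1)).foldl (fun acc p => insL p acc) g.2)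
          :: (bps.filter (fun p => !(IntInRange p g.1))).foldl (fun gs p => assignP p gs) gs := by
  intro bps
  induction bps with
  | nil => intro g gs; rfl
  | cons p bps ih =>
    intro g gs
    by_cases hc : IntInRange p g.1
    · simp only [List.foldl_cons, assignP, hc, if_pos, List.filter_cons, Bool.not_true]
      rw [ih ⟨g.1, insL p g.2⟩ gs]
      simp
    · simp only [List.foldl_cons, assignP, hc, Bool.false_eq_true, if_neg, not_false_iff,
        List.filter_cons]
      rw [ih g (assignP p gs)]
      simp

def splitRecA : List (List Int) → List Int → List (List Int)
  | [], _ => []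
  | s :: tl, bps =>
      chain0 s ((bps.filter (fun p => IntInRange p s)).foldl (fun acc p => insL p acc) [])
        ++ splitRecA tl (bps.filter (fun p => !(IntInRange p s)))

theorem foldl_assign_nil (bps : List Int) :
    bps.foldl (fun gs p => assignP p gs) [] = [] := by
  induction bps with
  | nil => rfl
  | cons p bps ih => simpa [assignP] using ih

theorem flat_fold :
    ∀ (sects : List (List Int)) (bps : List Int),
      flatG (bps.foldl (fun gs p => assignP p gs) (sects.map (fun s => (s, ([] : List Int)))))
        = splitRecA sects bps := by
  intro sects
  induction sects with
  | nil => intro bps; rw [List.map_nil, foldl_assign_nil]; rfl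
  | cons s tl ih =>
    intro bps
    rw [List.map_cons, foldl_assign_cons]
    show flatG (_ :: _) = _
    have : flatG ((s, (bps.filter (fun p => IntInRange p s)).foldl (fun acc p => insL p acc) [])
        :: (bps.filter (fun p => !(IntInRange p s))).foldl (fun gs p => assignP p gs)
            (tl.map (fun s => (s, ([] : List Int)))))
        = chain0 s ((bps.filter (fun p => IntInRange p s)).foldl (fun acc p => insL p acc) [])
          ++ flatG ((bps.filter (fun p => !(IntInRange p s))).foldl (fun gs p => assignP p gs)
              (tl.map (fun s => (s, ([] : List Int))))) := by simp [flatG]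
    rw [this, ih]
    rfl

theorem foldl_insL_pairwise :
    ∀ (l : List Int) (acc : List Int), acc.Pairwise (· ≤ ·) →
      (l.foldl (fun acc p => insL p acc) acc).Pairwise (· ≤ ·) := by
  intro l
  induction l with
  | nil => intro acc h; exact h
  | cons p l ih => intro acc h; exact ih _ (insL_pairwise p acc h)

theorem foldl_insL_perm :
    ∀ (l : List Int) (acc : List Int),
      (l.foldl (fun acc p => insL p acc) acc).Perm (l ++ acc) := by
  intro l
  induction l with
  | nil => intro acc; simp
  | cons p l ih =>
    intro acc
    simp only [List.foldl_cons]
    refine (ih (insL p acc)).trans ?_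
    refine (List.Perm.append_left l (insL_perm p acc)).trans ?_
    exact List.perm_middle

theorem foldl_insL_eq_sorted (l : List Int) :
    l.foldl (fun acc p => insL p acc) [] = PySem.List.sorted l (fun x => x) := by
  have hperm : (l.foldl (fun acc p => insL p acc) []).Perm l := by
    simpa using foldl_insL_perm l []
  exact (PySem.List.sorted_id_eq_of_perm_of_pairwise l _ hperm
    (foldl_insL_pairwise l [] (List.Pairwise.nil))).symm

theorem fidx_cons_zero (p : Int) (s : List Int) (tl : List (List Int)) :
    (List.findIdx? (fun t => IntInRange p t) (s :: tl) = some 0) ↔ IntInRange p s = true := by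
  rw [List.findIdx?_cons]
  by_cases hc : IntInRange p s <;> simp [hc]

theorem fidx_cons_succ (p : Int) (s : List Int) (tl : List (List Int)) (i : Nat) :
    (List.findIdx? (fun t => IntInRange p t) (s :: tl) = some (i + 1)) ↔
      (IntInRange p s = false ∧ List.findIdx? (fun t => IntInRange p t) tl = some i) := by
  rw [List.findIdx?_cons]
  by_cases hc : IntInRange p s <;> simp [hc]

theorem splitRecA_idx :
    ∀ (sects : List (List Int)) (bps : List Int),
      splitRecA sects bps = sects.zipIdx.flatMap (fun si =>
        chain0 si.1 (PySem.List.sorted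
          (bps.filter (fun p => List.findIdx? (fun t => IntInRange p t) sects = some si.2))
          (fun x => x))) := by
  intro sects
  induction sects with
  | nil => intro bps; rfl
  | cons s tl ih =>
    intro bps
    show chain0 s _ ++ _ = _
    rw [List.zipIdx_cons, List.flatMap_cons]
    congr 1
    · rw [foldl_insL_eq_sorted]
      congr 2
      apply List.filter_congr
      intro p _
      rw [Bool.eq_iff_iff]
      simp [fidx_cons_zero]
    · rw [ih (bps.filter (fun p => !(IntInRange p s)))]
      rw [List.zipIdx_succ, List.flatMap_map]
      refine congrArg (fun f => List.flatMap f tl.zipIdx) ?_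
      funext si
      obtain ⟨a, i⟩ := si
      show chain0 a _ = chain0 a _
      apply congrArg
      apply congrArg (fun l => PySem.List.sorted l (fun x => x))
      rw [List.filter_filter]
      apply List.filter_congr
      intro p _
      rw [Bool.eq_iff_iff]
      simp only [Bool.and_eq_true, Bool.not_eq_true', decide_eq_true_eq]
      rw [fidx_cons_succ]
      tauto

def bpBlock (m : Int × List Int) (s : List Int) : List Int :=
  (if IntInRange (m.2.getD 0 0) s then [m.2.getD 0 0] else [])
    ++ (if IntInRange (m.2.getD 1 0) s then [m.2.getD 1 0] else [])

theorem gen_foldl_append {α β : Type} (f : α → List β) :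
    ∀ (l : List α) (acc : List β), l.foldl (fun a x => a ++ f x) acc = acc ++ l.flatMap f := by
  intro l
  induction l with
  | nil => intro acc; simp
  | cons x l ih => intro acc; simp [ih]

theorem bp_eq (maps : List (Int × List Int)) (sections : List (List Int)) :
    pvBreakpoints maps sections
      = maps.flatMap (fun m => sections.flatMap (fun s => bpBlock m s)) := by
  have hstep : ∀ (x y : Int) (acc : List Int) (s : List Int),
      (let acc' := if IntInRange x s then acc ++ [x] else acc
       if IntInRange y s then acc' ++ [y] else acc')
        = acc ++ ((if IntInRange x s then [x] else []) ++ (if IntInRange y s then [y] else [])) := by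
    intro x y acc s
    by_cases h1 : IntInRange x s <;> by_cases h2 : IntInRange y s <;> simp [h1, h2]
  have hinner : ∀ (m : Int × List Int) (acc : List Int),
      sections.foldl (fun bps s =>
        let bps' := if IntInRange (m.2.getD 0 0) s then bps ++ [m.2.getD 0 0] else bps
        if IntInRange (m.2.getD 1 0) s then bps' ++ [m.2.getD 1 0] else bps') acc
        = acc ++ sections.flatMap (fun s => bpBlock m s) := by
    intro m acc
    rw [← gen_foldl_append (fun s => bpBlock m s) sections acc]
    apply PySem.List.foldl_congr_mem
    intro a b hb
    exact hstep (m.2.getD 0 0) (m.2.getD 1 0) a b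
  show maps.foldl _ [] = _
  have hgen := gen_foldl_append (fun m => sections.flatMap (fun s => bpBlock m s)) maps []
  rw [List.nil_append] at hgen
  rw [← hgen]
  apply PySem.List.foldl_congr_mem
  intro a m hm
  exact hinner m a

theorem bp_mem (maps : List (Int × List Int)) (sections : List (List Int)) :
    ∀ p ∈ pvBreakpoints maps sections, ∃ s ∈ sections, IntInRange p s = true := by
  intro p hp
  rw [bp_eq] at hp
  rcases List.mem_flatMap.mp hp with ⟨m, _, hp2⟩
  rcases List.mem_flatMap.mp hp2 with ⟨s, hs, hp3⟩
  unfold bpBlock at hp3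
  rcases List.mem_append.mp hp3 with h | h
  · by_cases hc : IntInRange (m.2.getD 0 0) s
    · rw [if_pos hc] at h; simp at h; exact ⟨s, hs, by rw [h]; exact hc⟩
    · rw [if_neg hc] at h; exact absurd h (List.not_mem_nil)
  · by_cases hc : IntInRange (m.2.getD 1 0) s
    · rw [if_pos hc] at h; simp at h; exact ⟨s, hs, by rw [h]; exact hc⟩
    · rw [if_neg hc] at h; exact absurd h (List.not_mem_nil)

theorem A_char (maps : List (Int × List Int)) (sections : List (List Int)) :
    SrcToDest maps sections
      = (sections.zipIdx.flatMap (fun si =>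
          chain0 si.1 (PySem.List.sorted ((pvBreakpoints maps sections).filter
            (fun p => List.findIdx? (fun t => IntInRange p t) sections = some si.2))
            (fun x => x)))).map (pvShift maps) := by
  have hflat0 : flatG (sections.map (fun s => (s, ([] : List Int)))) = sections := by
    unfold flatG
    rw [List.flatMap_map]
    have : (fun a : List Int => chain0 (a, ([] : List Int)).1 (a, ([] : List Int)).2)
        = fun s : List Int => [s] := by funext s; rfl
    rw [this, List.flatMap_singleton']
  have hinv : InvG (sections.map (fun s => (s, ([] : List Int)))) := by
    intro g hg
    rcases List.mem_map.mp hg with ⟨s, _, rfl⟩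
    exact ⟨List.Pairwise.nil, by simp⟩
  have hmem : ∀ p ∈ pvBreakpoints maps sections,
      ∃ g ∈ sections.map (fun s => (s, ([] : List Int))), IntInRange p g.1 = true := by
    intro p hp
    rcases bp_mem maps sections p hp with ⟨s, hs, hc⟩
    exact ⟨(s, []), List.mem_map_of_mem hs, hc⟩
  have h1 := foldl_split (pvBreakpoints maps sections) _ hinv hmem
  rw [hflat0] at h1
  unfold SrcToDest
  rw [h1, flat_fold, splitRecA_idx]

def epList (maps : List (Int × List Int)) : List Int :=
  maps.flatMap (fun m => [m.2.getD 0 0, m.2.getD 1 0])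

def contrib (sections : List (List Int)) (i : Nat) (e : Int) : List Int :=
  if sections.findIdx? (fun s => IntInRange e s) = some i
  then List.replicate (sections.countP (fun s => IntInRange e s)) e else []

theorem zip_chain_map (f : Int × Int → List Int) :
    ∀ (ps : List Int) (a b : Int),
      ((a :: (ps ++ [b])).zip (ps ++ [b])).map f
        = (chain a b ps).map (fun piece => f (piece.getD 0 0, piece.getD 1 0)) := by
  intro ps
  induction ps with
  | nil => intro a b; simp [chain]
  | cons p ps ih =>
    intro a b
    show ((a :: (p :: (ps ++ [b]))).zip (p :: (ps ++ [b]))).map f = _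
    rw [List.zip_cons_cons, List.map_cons, ih p b]
    show _ = (chain a b (p :: ps)).map _
    rw [chain, List.map_cons]
    simp

theorem pieces_eq (maps : List (Int × List Int)) (s : List Int) (cuts : List Int) :
    pvPieces maps s cuts
      = (chain (s.getD 0 0) (s.getD 1 0) (PySem.List.sorted cuts (fun x => x))).map
          (pvShift maps) := by
  unfold pvPieces
  show ((s.getD 0 0 :: ((PySem.List.sorted cuts (fun x => x)) ++ [s.getD 1 0])).zip
      ((PySem.List.sorted cuts (fun x => x)) ++ [s.getD 1 0])).map _ = _
  rw [zip_chain_map (fun ab =>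
    let shift := ((maps.find? (fun mapp =>
        decide (mapp.2.getD 0 0 ≤ ab.1) && decide (ab.1 < mapp.2.getD 1 0))).map Prod.fst).getD 0
    [ab.1 + shift, ab.2 + shift]) (PySem.List.sorted cuts (fun x => x)) (s.getD 0 0) (s.getD 1 0)]
  rfl

theorem map_shift_chain0 (maps : List (Int × List Int)) (s : List Int) (ps : List Int) :
    (chain0 s ps).map (pvShift maps)
      = (chain (s.getD 0 0) (s.getD 1 0) ps).map (pvShift maps) := by
  cases ps with
  | nil => simp [chain0, chain, pvShift]
  | cons p ps => rw [chain0_eq_chain _ _ (by simp)]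

theorem flatMap_append_perm {α : Type} (l : List α) (f g : α → List Int) :
    (l.flatMap (fun a => f a ++ g a)).Perm (l.flatMap f ++ l.flatMap g) := by
  induction l with
  | nil => simp
  | cons a l ih =>
    simp only [List.flatMap_cons]
    have hsh : ∀ (x y X Y : List Int), ((x ++ y) ++ (X ++ Y)).Perm ((x ++ X) ++ (y ++ Y)) := by
      intro x y X Y
      rw [List.perm_iff_count]
      intro a
      simp only [List.count_append]
      omega
    exact (List.Perm.append_left _ ih).trans (hsh _ _ _ _)

theorem flatMap_perm_congr {α : Type} (l : List α) (f g : α → List Int)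
    (h : ∀ a ∈ l, (f a).Perm (g a)) :
    (l.flatMap f).Perm (l.flatMap g) := by
  induction l with
  | nil => simp
  | cons a l ih =>
    simp only [List.flatMap_cons]
    exact (h a (by simp)).append (ih (fun a ha => h a (by simp [ha])))

theorem flatMap_if_singleton (e : Int) (sections : List (List Int)) :
    sections.flatMap (fun s => if IntInRange e s then [e] else [])
      = List.replicate (sections.countP (fun s => IntInRange e s)) e := by
  induction sections with
  | nil => simp
  | cons s tl ih =>
    rw [List.flatMap_cons, ih]
    by_cases hc : IntInRange e s
    · rw [if_pos hc, List.countP_cons_of_pos (p := fun s => IntInRange e s) hc,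
        List.replicate_succ]
      rfl
    · rw [if_neg hc, List.countP_cons_of_neg (p := fun s => IntInRange e s) hc]
      rfl

theorem Afilter_perm_contrib (maps : List (Int × List Int)) (sections : List (List Int)) (i : Nat) :
    ((pvBreakpoints maps sections).filter
        (fun p => List.findIdx? (fun t => IntInRange p t) sections = some i)).Perm
      ((epList maps).flatMap (contrib sections i)) := by
  rw [bp_eq, List.filter_flatMap]
  have hb : (epList maps).flatMap (contrib sections i)
      = maps.flatMap (fun m =>
          contrib sections i (m.2.getD 0 0) ++ contrib sections i (m.2.getD 1 0)) := by
    unfold epList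
    induction maps with
    | nil => rfl
    | cons m ms ih =>
      rw [List.flatMap_cons, List.flatMap_append, ih, List.flatMap_cons]
      simp only [List.flatMap_cons, List.flatMap_nil, List.append_nil]
  rw [hb]
  apply flatMap_perm_congr
  intro m _
  rw [List.filter_flatMap]
  have hstep : ∀ s : List Int,
      (bpBlock m s).filter (fun p => decide (List.findIdx? (fun t => IntInRange p t) sections = some i))
        = (if (IntInRange (m.2.getD 0 0) s
              && decide (List.findIdx? (fun t => IntInRange (m.2.getD 0 0) t) sections = some i))
           then [m.2.getD 0 0] else [])
          ++ (if (IntInRange (m.2.getD 1 0) s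
              && decide (List.findIdx? (fun t => IntInRange (m.2.getD 1 0) t) sections = some i))
           then [m.2.getD 1 0] else []) := by
    intro s
    unfold bpBlock
    rw [List.filter_append]
    congr 1
    · by_cases h1 : IntInRange (m.2.getD 0 0) s
      · by_cases h2 : List.findIdx? (fun t => IntInRange (m.2.getD 0 0) t) sections = some i <;>
          · simp only [List.getD_eq_getElem?_getD] at h1 h2
            simp [h1, h2]
      · simp only [List.getD_eq_getElem?_getD] at h1
        simp [h1]
    · by_cases h1 : IntInRange (m.2.getD 1 0) s
      · by_cases h2 : List.findIdx? (fun t => IntInRange (m.2.getD 1 0) t) sections = some i <;>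
          · simp only [List.getD_eq_getElem?_getD] at h1 h2
            simp [h1, h2]
      · simp only [List.getD_eq_getElem?_getD] at h1
        simp [h1]
  simp only [hstep]
  refine (flatMap_append_perm sections _ _).trans ?_
  have hPe : ∀ e : Int,
      sections.flatMap (fun s =>
        if (IntInRange e s && decide (List.findIdx? (fun t => IntInRange e t) sections = some i))
        then [e] else [])
        = contrib sections i e := by
    intro e
    by_cases hd : List.findIdx? (fun t => IntInRange e t) sections = some i
    · simp only [hd, decide_true, Bool.and_true]
      rw [flatMap_if_singleton]
      unfold contrib
      rw [if_pos hd]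
    · unfold contrib
      rw [if_neg hd]
      have hz : ∀ s : List Int,
          (IntInRange e s && decide (List.findIdx? (fun t => IntInRange e t) sections = some i))
            = false := by
        intro s; simp [hd]
      simp [hz]
  rw [hPe (m.2.getD 0 0), hPe (m.2.getD 1 0)]

-- under "each endpoint in at most one section", findIdx? is determined by membership
theorem findIdx?_of_getElem?_of_countP_le_one {α : Type} (P : α → Bool) :
    ∀ (l : List α) (i : Nat) (s : α), l[i]? = some s → P s = true → l.countP P ≤ 1 →
      l.findIdx? P = some i := by
  intro l
  induction l with
  | nil => intro i s h _ _; simp at h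
  | cons a tl ih =>
    intro i s h hP hc
    cases i with
    | zero =>
      simp at h
      rw [List.findIdx?_cons, if_pos (h ▸ hP)]
    | succ i =>
      simp only [List.getElem?_cons_succ] at h
      have hmem : s ∈ tl := List.mem_of_getElem? h
      have htl : 0 < tl.countP P := List.countP_pos_iff.mpr ⟨s, hmem, hP⟩
      have hca : P a = false := by
        by_cases hPa : P a
        · rw [List.countP_cons_of_pos hPa] at hc; omega
        · simpa using hPa
      rw [List.countP_cons_of_neg (by simp [hca])] at hc
      rw [List.findIdx?_cons, if_neg (by simp [hca]), ih i s h hP hc]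
      rfl

theorem findIdx?_some_getP {α : Type} (P : α → Bool) (l : List α) (i : Nat)
    (h : l.findIdx? P = some i) : ∃ s, l[i]? = some s ∧ P s = true := by
  rcases List.findIdx?_eq_some_iff_getElem.mp h with ⟨hlt, hP, _⟩
  exact ⟨l[i], List.getElem?_eq_getElem hlt, hP⟩

theorem flatMap_if_eq_filter {α : Type} (P : α → Bool) (l : List α) :
    l.flatMap (fun a => if P a then [a] else []) = l.filter P := by
  induction l with
  | nil => rfl
  | cons a tl ih =>
    rw [List.flatMap_cons, ih, List.filter_cons]
    by_cases h : P a <;> simp [h]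

theorem contrib_eq_of_unique (sections : List (List Int)) (i : Nat) (s : List Int) (e : Int)
    (hi : sections[i]? = some s)
    (hc : sections.countP (fun t => IntInRange e t) ≤ 1) :
    contrib sections i e = if IntInRange e s then [e] else [] := by
  by_cases hes : IntInRange e s
  · have hf : sections.findIdx? (fun t => IntInRange e t) = some i :=
      findIdx?_of_getElem?_of_countP_le_one _ sections i s hi hes hc
    have hcp : sections.countP (fun t => IntInRange e t) = 1 := by
      have : 0 < sections.countP (fun t => IntInRange e t) :=
        List.countP_pos_iff.mpr ⟨s, List.mem_of_getElem? hi, hes⟩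
      omega
    unfold contrib
    rw [if_pos hf, hcp]
    simp [hes]
  · unfold contrib
    rw [if_neg (by
      intro hf
      rcases findIdx?_some_getP _ sections i hf with ⟨s', hs', hPs'⟩
      rw [hi] at hs'
      injection hs' with hss
      exact hes (hss ▸ hPs'))]
    simp [hes]

theorem B_char (maps : List (Int × List Int)) (sections : List (List Int)) :
    SrcToDest_alt maps sections
      = sections.flatMap (fun s =>
          (chain0 s (PySem.List.sorted ((epList maps).filter (fun e => IntInRange e s))
            (fun x => x))).map (pvShift maps)) := by
  unfold SrcToDest_alt
  apply List.flatMap_congr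
  intro s _
  rw [pieces_eq, ← map_shift_chain0]
  have hcuts : maps.flatMap (fun m =>
      ([m.2.getD 0 0, m.2.getD 1 0]).filter (fun e =>
        decide (s.getD 0 0 ≤ e) && decide (e < s.getD 1 0)))
      = (epList maps).filter (fun e => IntInRange e s) := by
    unfold epList
    rw [List.filter_flatMap]
    rfl
  rw [hcuts]

theorem flatMap_eq_flatMap_zipIdx {α β : Type} (l : List α) (f : α → List β) :
    l.flatMap f = l.zipIdx.flatMap (fun si => f si.1) := by
  conv_lhs => rw [← List.zipIdx_map_fst 0 l]
  rw [List.flatMap_map]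

theorem AB_eq (maps : List (Int × List Int)) (sections : List (List Int))
    (hpre : ∀ e ∈ epList maps, sections.countP (fun t => IntInRange e t) ≤ 1) :
    SrcToDest maps sections = SrcToDest_alt maps sections := by
  rw [A_char, B_char, List.map_flatMap]
  conv_rhs => rw [flatMap_eq_flatMap_zipIdx]
  apply List.flatMap_congr
  intro si hsi
  obtain ⟨s, i⟩ := si
  have hget : sections[i]? = some s := List.mk_mem_zipIdx_iff_getElem?.mp hsi
  apply congrArg
  apply congrArg
  have hperm : ((pvBreakpoints maps sections).filter
      (fun p => List.findIdx? (fun t => IntInRange p t) sections = some i)).Perm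
      ((epList maps).filter (fun e => IntInRange e s)) := by
    refine (Afilter_perm_contrib maps sections i).trans ?_
    rw [← flatMap_if_eq_filter]
    apply List.Perm.of_eq
    apply List.flatMap_congr
    intro e he
    exact contrib_eq_of_unique sections i s e hget (hpre e he)
  apply PySem.List.sorted_id_eq_of_perm_of_pairwise
  · exact (PySem.List.sorted_perm _ _ _).trans hperm.symm
  · exact PySem.List.sorted_pairwise _ _

-- ===== VERDICT (by name: the statement is the Claim_ definition above) =====
theorem SrcToDest_spec : Claim_equal_SrcToDest := by
  unfold Claim_equal_SrcToDest
  intro maps sections _ hpre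
  unfold Spec_SrcToDest
  apply AB_eq
  intro e he
  rcases List.mem_flatMap.mp he with ⟨m, hm, he2⟩
  have hcnt := hpre.2.2 m hm e he2
  calc sections.countP (fun t => IntInRange e t)
      = sections.countP (fun s => decide (s.getD 0 0 ≤ e ∧ e < s.getD 1 0)) := by
        apply List.countP_congr
        intro s _
        simp [IntInRange]
    _ ≤ 1 := hcnt
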